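-- pv_equiv track=rewrite | github.com/avinpereira/code-forces | love_a.py | love_a
-- ===== SOURCE A (Python) =====
-- def love_a(string):
-- 	length = len(string)
-- 	counta = 0
-- 	for i in string:
-- 		if i == "a":
-- 			counta += 1
-- 	counto = length - counta
--
-- 	removed = 0
-- 	while((counto + counta)/2 >= counta):
-- 		removed += 1
-- 		counto -= 1
-- 	return length - removed
-- ===== SOURCE B (Python) =====
-- def love_a(string):
--     counta = string.count("a")
--     counto = len(string) - counta
--     return len(string) - max(0, counto - counta + 1)
-- ===== Notes on version B (the rewrite author's own statement) =====
-- stated objective: simpler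
-- what changed: Replaced the counting for-loop and the decrementing while-loop with string.count and the closed form removed = max(0, counto - counta + 1).
import Mathlib
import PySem

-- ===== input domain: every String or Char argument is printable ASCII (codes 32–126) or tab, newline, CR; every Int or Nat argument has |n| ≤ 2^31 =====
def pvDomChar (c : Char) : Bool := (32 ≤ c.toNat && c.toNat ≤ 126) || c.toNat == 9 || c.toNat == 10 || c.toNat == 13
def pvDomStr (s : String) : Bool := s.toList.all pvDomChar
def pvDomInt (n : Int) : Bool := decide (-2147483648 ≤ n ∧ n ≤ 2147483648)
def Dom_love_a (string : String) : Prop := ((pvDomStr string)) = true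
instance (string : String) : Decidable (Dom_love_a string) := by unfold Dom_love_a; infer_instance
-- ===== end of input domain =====

-- B replaces A's counting for-loop and decrementing while-loop by string.count and the
-- closed form removed = max(0, counto - counta + 1) (simpler; same O(n) cost).


-- ===== PORT A =====
-- the while-loop; its condition (counto+counta)/2 >= counta (exact float comparison of
-- small integers) is ported as the equivalent integer comparison counto + counta ≥ 2*counta
def love_a_loop (counta counto removed : Int) : Int :=
  if counto + counta ≥ 2 * counta then
    love_a_loop counta (counto - 1) (removed + 1)
  else removed
termination_by (counto - counta + 1).toNat
decreasing_by omega

def love_a (string : String) : Int :=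
  let length : Int := (PySem.Str.len string : Int)
  let counta : Int := string.toList.foldl (fun acc i => if i == 'a' then acc + 1 else acc) 0
  let counto : Int := length - counta
  let removed : Int := love_a_loop counta counto 0
  length - removed

-- ===== PORT B =====
def love_a_alt (string : String) : Int :=
  let counta : Int := (PySem.Str.count string "a" : Int)
  let counto : Int := (PySem.Str.len string : Int) - counta
  (PySem.Str.len string : Int) - max 0 (counto - counta + 1)

-- ===== PRECONDITION & SPEC =====
def Spec_love_a (string : String) (out : Int) : Prop := out = love_a_alt string
instance (string : String) (out : Int) : Decidable (Spec_love_a string out) := by unfold Spec_love_a; infer_instance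

-- ===== CLAIM (what is proved, stated in full; the proofs are below) =====
def Claim_equal_love_a : Prop := ∀ (string : String), Dom_love_a string → Spec_love_a string (love_a string)

-- ===== LEMMAS AND PROOFS =====
-- The while-loop performs exactly max 0 (counto - counta + 1) iterations.
theorem love_a_loop_eq (counta counto removed : Int) :
    love_a_loop counta counto removed = removed + max 0 (counto - counta + 1) := by
  fun_induction love_a_loop counta counto removed with
  | case1 counto removed h ih => rw [ih]; omega
  | case2 counto removed h => omega

-- single-character substring count is character count
theorem chars_count_go_singleton (c : Char) (l : List Char) (fuel : Nat) (acc : Nat)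
    (h : l.length ≤ fuel) :
    PySem.Chars.count.go [c] fuel l acc = acc + l.count c := by
  induction l generalizing fuel acc with
  | nil => cases fuel <;> simp [PySem.Chars.count.go]
  | cons x t ih =>
    cases fuel with
    | zero => simp at h
    | succ n =>
      rw [PySem.Chars.count.go]
      by_cases hx : x = c
      · subst hx
        simp only [List.isPrefixOf, BEq.rfl, Bool.true_and, if_true,
          List.length_cons, List.length_nil, List.drop_succ_cons, List.drop_zero]
        rw [ih _ _ (by simpa using h)]
        simp
        omega
      · have hpre : ([c].isPrefixOf (x :: t)) = false := by
          simp [List.isPrefixOf]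
          exact fun hc => absurd hc.symm hx
        rw [hpre]
        simp only [Bool.false_eq_true, if_false]
        rw [ih _ _ (by simpa using h)]
        simp [hx]

theorem chars_count_singleton (c : Char) (l : List Char) :
    PySem.Chars.count l [c] = l.count c := by
  simp [PySem.Chars.count]
  rw [chars_count_go_singleton c l l.length 0 le_rfl]; omega

-- ===== VERDICT (by name: the statement is the Claim_ definition above) =====
theorem love_a_spec : Claim_equal_love_a := by
  intro s _
  show love_a s = love_a_alt s
  simp only [love_a, love_a_alt, love_a_loop_eq, PySem.List.foldl_beq_add_one,
    PySem.Str.count_eq, show ("a" : String).toList = ['a'] from rfl, chars_count_singleton]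
  omega
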